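-- pv_equiv track=rewrite | github.com/MrBrantCode/unitest_baseline | mut_generate/mist_train_cf/cf_26810/solution.py | solve
-- ===== SOURCE A (Python) =====
-- def solve(Clauses, Variables):
--     def assign_value(var, value, assignment):
--         if var < 0:
--             assignment[-var - 1] = not value
--         else:
--             assignment[var - 1] = value
--
--     def satisfy_clause(clause, assignment):
--         for literal in clause:
--             var = abs(literal)
--             value = literal > 0
--             if (assignment[var - 1] if var in Variables else False) == value:
--                 return True
--         return False
--
--     def satisfy_all_clauses(clauses, assignment):
--         return all(satisfy_clause(clause, assignment) for clause in clauses)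
--
--     def backtrack(clauses, assignment, var_index):
--         if var_index == len(Variables):
--             return satisfy_all_clauses(Clauses, assignment)
--
--         var = Variables[var_index]
--         for value in [True, False]:
--             assign_value(var, value, assignment)
--             if backtrack(clauses, assignment, var_index + 1):
--                 return True
--         return False
--
--     assignment = [False] * len(Variables)
--     if backtrack(Clauses, assignment, 0):
--         return [int(assignment[i]) for i in range(len(Variables))]
--     else:
--         return []
-- ===== SOURCE B (Python) =====
-- def solve(Clauses, Variables):
--     n = len(Variables)
--     for mask in range(1 << n):
--         # True-first lexicographic order: bit 0 of the combo is the top bit of mask, True when the bit is 0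
--         assignment = [False] * n
--         for i in range(n):
--             value = not ((mask >> (n - 1 - i)) & 1)
--             var = Variables[i]
--             if var < 0:
--                 assignment[-var - 1] = not value
--             else:
--                 assignment[var - 1] = value
--         if all(any((assignment[abs(l) - 1] if abs(l) in Variables else False) == (l > 0) for l in clause) for clause in Clauses):
--             return [int(assignment[i]) for i in range(n)]
--     return []
-- ===== Notes on version B (the rewrite author's own statement) =====
-- stated objective: alternative
-- what changed: The recursive backtrack with a shared mutated assignment array is replaced by a flat loop over bitmasks 0..2^n-1 (top mask bit = first variable, bit 0 = True) that rebuilds a fresh assignment per candidate and tests all clauses, returning on the first success.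
import Mathlib
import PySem

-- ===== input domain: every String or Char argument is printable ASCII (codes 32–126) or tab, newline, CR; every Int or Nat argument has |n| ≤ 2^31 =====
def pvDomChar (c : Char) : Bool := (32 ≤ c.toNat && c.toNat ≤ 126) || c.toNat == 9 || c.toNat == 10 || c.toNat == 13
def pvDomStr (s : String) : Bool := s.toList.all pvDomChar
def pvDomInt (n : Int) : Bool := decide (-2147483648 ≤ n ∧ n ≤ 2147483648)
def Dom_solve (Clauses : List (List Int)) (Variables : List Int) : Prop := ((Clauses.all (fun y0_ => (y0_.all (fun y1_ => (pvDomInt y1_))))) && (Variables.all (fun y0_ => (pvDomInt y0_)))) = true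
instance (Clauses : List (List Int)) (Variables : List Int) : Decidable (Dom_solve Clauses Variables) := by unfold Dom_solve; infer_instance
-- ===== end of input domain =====

-- B replaces A's recursive backtracking over a shared mutated array by a flat loop over bitmasks,
-- rebuilding a fresh assignment per candidate; same results on every input where A returns (Pre_).

-- ===== PORT A =====
-- assign_value(var, value, assignment): returns the updated list; none = IndexError
def pvAssignValue (var : Int) (value : Bool) (assignment : List Bool) : Option (List Bool) :=
  if var < 0 then PySem.List.pySet? assignment (-var - 1) (!value)
  else PySem.List.pySet? assignment (var - 1) value

-- satisfy_clause(clause, assignment): early-return loop; none = IndexError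
def pvSatisfyClause (Variables : List Int) (assignment : List Bool) : List Int → Option Bool
  | [] => some false
  | literal :: rest =>
    match (if |literal| ∈ Variables then PySem.List.pyGet? assignment (|literal| - 1) else some false) with
    | none => none
    | some lv => if lv = decide (0 < literal) then some true else pvSatisfyClause Variables assignment rest

-- all(satisfy_clause(c, a) for c in clauses): short-circuits at the first false clause
def pvSatisfyAll (Variables : List Int) (assignment : List Bool) : List (List Int) → Option Bool
  | [] => some true
  | c :: cs =>
    match pvSatisfyClause Variables assignment c with
    | none => none
    | some true => pvSatisfyAll Variables assignment cs
    | some false => some false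

-- backtrack(clauses, assignment, var_index): recursion over the remaining suffix of Variables,
-- threading the mutated assignment; result = (found?, assignment after the call)
def pvBacktrack (Clauses : List (List Int)) (Variables : List Int) (assignment : List Bool) : List Int → Option (Bool × List Bool)
  | [] =>
    match pvSatisfyAll Variables assignment Clauses with
    | none => none
    | some b => some (b, assignment)
  | var :: rest =>
    match pvAssignValue var true assignment with
    | none => none
    | some a1 =>
      match pvBacktrack Clauses Variables a1 rest with
      | none => none
      | some (true, a1') => some (true, a1')
      | some (false, a1') =>
        match pvAssignValue var false a1' with
        | none => none
        | some a2 => pvBacktrack Clauses Variables a2 rest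

def solve (Clauses : List (List Int)) (Variables : List Int) : List Int :=
  let assignment := List.replicate Variables.length false
  match pvBacktrack Clauses Variables assignment Variables with
  | some (true, a) => (List.range Variables.length).map (fun i => if PySem.List.pyGetD a (i : Int) false then (1 : Int) else 0)
  | _ => []

-- ===== PORT B =====
-- for i in range(n): value = not ((mask >> (n-1-i)) & 1); assign to Variables[i] (iterated with index i)
def pvAssignB (n mask : Nat) : List Int → Nat → List Bool → Option (List Bool)
  | [], _, a => some a
  | var :: vs, i, a =>
    let value := !(Nat.testBit mask (n - 1 - i))
    match (if var < 0 then PySem.List.pySet? a (-var - 1) (!value) else PySem.List.pySet? a (var - 1) value) with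
    | none => none
    | some a2 => pvAssignB n mask vs (i + 1) a2

-- (assignment[abs(l)-1] if abs(l) in Variables else False) == (l > 0), one literal
def pvLitB (Variables : List Int) (a : List Bool) (l : Int) : Bool :=
  (if |l| ∈ Variables then PySem.List.pyGetD a (|l| - 1) false else false) == decide (0 < l)

-- all(any(... for l in clause) for clause in Clauses); exact wherever no IndexError occurs (inside Pre_)
def pvClausesOK (Clauses : List (List Int)) (Variables : List Int) (a : List Bool) : Bool :=
  Clauses.all (fun c => c.any (pvLitB Variables a))

-- for mask in range(1 << n): build, test, return on first success
def pvMaskLoop (Clauses : List (List Int)) (Variables : List Int) (n : Nat) : List Nat → List Int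
  | [] => []
  | mask :: ms =>
    match pvAssignB n mask Variables 0 (List.replicate n false) with
    | none => []
    | some a =>
      if pvClausesOK Clauses Variables a then
        (List.range n).map (fun i => if PySem.List.pyGetD a (i : Int) false then (1 : Int) else 0)
      else pvMaskLoop Clauses Variables n ms

def solve_alt (Clauses : List (List Int)) (Variables : List Int) : List Int :=
  let n := Variables.length
  pvMaskLoop Clauses Variables n (List.range (2 ^ n))

-- ===== PRECONDITION & SPEC =====
-- Pre_ excludes exactly the inputs on which A raises IndexError: a variable v > 0 with v > len(Variables)
-- or v < 0 with -v > len(Variables) makes assign_value index out of range.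
def Pre_solve (Clauses : List (List Int)) (Variables : List Int) : Prop :=
  ∀ v ∈ Variables, (0 < v → v ≤ (Variables.length : Int)) ∧ (v < 0 → -v ≤ (Variables.length : Int))
instance (Clauses : List (List Int)) (Variables : List Int) : Decidable (Pre_solve Clauses Variables) := by unfold Pre_solve; infer_instance
def pvWitness_solve : List (List Int) × List Int := ([[1, -2], [2]], [1, 2])

def Spec_solve (Clauses : List (List Int)) (Variables : List Int) (out : List Int) : Prop := out = solve_alt Clauses Variables
instance (Clauses : List (List Int)) (Variables : List Int) (out : List Int) : Decidable (Spec_solve Clauses Variables out) := by unfold Spec_solve; infer_instance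

-- ===== CLAIM (what is proved, stated in full; the proofs are below) =====
def Claim_equal_solve : Prop := ∀ (Clauses : List (List Int)) (Variables : List Int), Dom_solve Clauses Variables → Pre_solve Clauses Variables → Spec_solve Clauses Variables (solve Clauses Variables)

-- ===== LEMMAS AND PROOFS =====

-- target index of the write for variable v in an array of length n (Python index -1 for v = 0 wraps to n-1)
def pvIdx (v : Int) (n : Nat) : Nat :=
  if v < 0 then (-v - 1).toNat else if v = 0 then n - 1 else (v - 1).toNat

-- value actually stored for variable v when the chosen combo value is b
def pvVal (v : Int) (b : Bool) : Bool := if v < 0 then !b else b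

-- a sequence of writes applied to the array
def pvGo (a : List Bool) (w : List (Nat × Bool)) : List Bool :=
  w.foldl (fun a p => a.set p.1 p.2) a

-- the writes performed for variables vs under combo values c
def pvW (n : Nat) : List Int → List Bool → List (Nat × Bool)
  | v :: vs, b :: bs => (pvIdx v n, pvVal v b) :: pvW n vs bs
  | _, _ => []

-- all length-k boolean combos, True first (A's enumeration order)
def pvCombos : Nat → List (List Bool)
  | 0 => [[]]
  | k + 1 => (pvCombos k).map (true :: ·) ++ (pvCombos k).map (false :: ·)

-- combo read off a mask, big-endian, clear bit = True (B's enumeration)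
def pvComboOf (n mask : Nat) : List Bool := (List.range n).map (fun i => !(Nat.testBit mask (n - 1 - i)))

-- in-range condition for the write of variable v into an array of length n
def pvInR (v : Int) (n : Nat) : Prop :=
  (0 < v → v ≤ (n : Int)) ∧ (v < 0 → -v ≤ (n : Int)) ∧ (v = 0 → 0 < n)

-- the output comprehension
def pvOut (n : Nat) (a : List Bool) : List Int :=
  (List.range n).map (fun i => if PySem.List.pyGetD a (i : Int) false then (1 : Int) else 0)

theorem pvGo_cons (a : List Bool) (p : Nat × Bool) (w : List (Nat × Bool)) :
    pvGo a (p :: w) = pvGo (a.set p.1 p.2) w := rfl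

theorem length_pvGo (w : List (Nat × Bool)) (a : List Bool) : (pvGo a w).length = a.length := by
  induction w generalizing a with
  | nil => rfl
  | cons p w ih => rw [pvGo_cons, ih, List.length_set]

theorem getElem?_pvGo (w : List (Nat × Bool)) (a : List Bool) (j : Nat) (hj : j < a.length) :
    (pvGo a w)[j]? =
      some (match w.reverse.find? (fun p => p.1 == j) with
            | some p => p.2
            | none => a[j]) := by
  induction w generalizing a with
  | nil => simp [pvGo, hj]
  | cons p w ih =>
    rw [pvGo_cons, ih (a.set p.1 p.2) (by simpa using hj)]
    rw [List.reverse_cons, List.find?_append]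
    cases h : w.reverse.find? (fun q => q.1 == j) with
    | some q => simp [h]
    | none =>
      simp only [h, Option.none_or]
      by_cases hpj : p.1 = j
      · simp [hpj, List.getElem_set]
      · simp [hpj, List.getElem_set]

theorem pvW_fst (n : Nat) (vs : List Int) (c : List Bool) (hc : c.length = vs.length) :
    (pvW n vs c).map Prod.fst = vs.map (pvIdx · n) := by
  induction vs generalizing c with
  | nil => cases c <;> simp [pvW]
  | cons v vs ih =>
    cases c with
    | nil => simp at hc
    | cons b bs => simp only [pvW, List.map_cons]; rw [ih bs (by simpa using hc)]

theorem length_pvCombos_mem (k : Nat) (c : List Bool) (hc : c ∈ pvCombos k) : c.length = k := by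
  induction k generalizing c with
  | zero => simp [pvCombos] at hc; simp [hc]
  | succ k ih =>
    simp only [pvCombos, List.mem_append, List.mem_map] at hc
    rcases hc with ⟨d, hd, rfl⟩ | ⟨d, hd, rfl⟩ <;> simp [ih d hd]

-- overwrite: an intermediate pass whose write indices are covered by the final pass is invisible
theorem pvGo_overwrite (w1 w2 : List (Nat × Bool)) (hfst : w1.map Prod.fst = w2.map Prod.fst)
    (a : List Bool) (i : Nat) (x y : Bool) :
    pvGo ((pvGo (a.set i x) w1).set i y) w2 = pvGo (a.set i y) w2 := by
  apply List.ext_getElem?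
  intro j
  by_cases hj : j < a.length
  · rw [getElem?_pvGo w2 _ j (by simpa [length_pvGo] using hj),
        getElem?_pvGo w2 _ j (by simpa using hj)]
    cases h : w2.reverse.find? (fun p => p.1 == j) with
    | some p => rfl
    | none =>
      have hnotin2 : ∀ p ∈ w2, p.1 ≠ j := by
        intro p hp
        have := List.find?_eq_none.mp h p (by simpa using hp)
        simpa using this
      have hnotin1 : ∀ p ∈ w1, p.1 ≠ j := by
        intro p hp hpj
        have : j ∈ w2.map Prod.fst := by
          rw [← hfst]; exact List.mem_map.mpr ⟨p, hp, hpj⟩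
        rcases List.mem_map.mp this with ⟨q, hq, hqj⟩
        exact hnotin2 q hq hqj
      simp only [Option.some.injEq]
      by_cases hij : i = j
      · subst hij
        rw [List.getElem_set, List.getElem_set]
        simp
      · rw [List.getElem_set, List.getElem_set, if_neg hij, if_neg hij]
        have h1 : j < (a.set i x).length := by simpa using hj
        have h2 : j < (pvGo (a.set i x) w1).length := by simpa [length_pvGo] using hj
        have := getElem?_pvGo w1 (a.set i x) j h1
        rw [List.getElem?_eq_getElem h2] at this
        cases h1f : w1.reverse.find? (fun p => p.1 == j) with
        | some p =>
          have hps := List.find?_some h1f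
          have hmem := List.mem_of_find?_eq_some h1f
          exact absurd (by simpa using hps) (hnotin1 p (by simpa using hmem))
        | none =>
          rw [h1f] at this
          simp only [Option.some.injEq] at this
          rw [this, List.getElem_set, if_neg hij]
  · have hl2 : ¬ j < (pvGo (a.set i y) w2).length := by simpa [length_pvGo] using hj
    have hl1 : ¬ j < (pvGo ((pvGo (a.set i x) w1).set i y) w2).length := by
      simpa [length_pvGo] using hj
    rw [List.getElem?_eq_none (by omega), List.getElem?_eq_none (by omega)]

-- assign_value succeeds and performs the write (pvIdx, pvVal)
theorem pvAssignValue_eq (v : Int) (b : Bool) (a : List Bool) (h : pvInR v a.length) :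
    pvAssignValue v b a = some (a.set (pvIdx v a.length) (pvVal v b)) := by
  obtain ⟨hpos, hneg, hzero⟩ := h
  unfold pvAssignValue pvIdx pvVal
  by_cases hv : v < 0
  · have h1 : -v ≤ (a.length : Int) := hneg hv
    simp only [if_pos hv, PySem.List.pySet?, PySem.List.pyIdx?]
    rw [if_pos (by omega), if_pos (by omega)]
    rfl
  · by_cases hv0 : v = 0
    · subst hv0
      have hlen : 0 < a.length := hzero rfl
      simp only [if_neg hv, PySem.List.pySet?, PySem.List.pyIdx?]
      rw [if_neg (by omega : ¬ (0:Int) ≤ 0 - 1), if_pos (by omega : -(a.length : Int) ≤ 0 - 1)]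
      norm_num
    · have hvpos : 0 < v := by omega
      have h1 : v ≤ (a.length : Int) := hpos hvpos
      simp only [if_neg hv, if_neg hv0, PySem.List.pySet?, PySem.List.pyIdx?]
      rw [if_pos (by omega), if_pos (by omega)]
      rfl

-- the read in the clause test succeeds
theorem pvRead_eq (v : Int) (a : List Bool) (hv : 0 ≤ v) (h : pvInR v a.length) :
    PySem.List.pyGet? a (v - 1) = some (PySem.List.pyGetD a (v - 1) false) := by
  obtain ⟨hpos, hneg, hzero⟩ := h
  have hne : PySem.List.pyGet? a (v - 1) ≠ none := by
    simp only [ne_eq, PySem.List.pyGet?_eq_none_iff, not_not, PySem.Raise.InRange]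
    constructor
    · by_cases hv0 : v = 0
      · subst hv0; have := hzero rfl; omega
      · omega
    · by_cases hv0 : v = 0
      · subst hv0; have := hzero rfl; omega
      · have := hpos (by omega); omega
  rcases Option.ne_none_iff_exists'.mp hne with ⟨x, hx⟩
  rw [hx, PySem.List.pyGetD, hx]
  rfl

-- A's satisfy_clause never raises and computes the any-fold
theorem pvSatisfyClause_eq (Variables : List Int) (a : List Bool)
    (hpre : ∀ v ∈ Variables, pvInR v a.length) (clause : List Int) :
    pvSatisfyClause Variables a clause = some (clause.any (pvLitB Variables a)) := by
  induction clause with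
  | nil => rfl
  | cons l ls ih =>
    rw [pvSatisfyClause]
    by_cases hmem : |l| ∈ Variables
    · rw [if_pos hmem, pvRead_eq |l| a (abs_nonneg l) (hpre _ hmem)]
      by_cases hv : PySem.List.pyGetD a (|l| - 1) false = decide (0 < l)
      · simp [hv, pvLitB, hmem]
      · simp [hv, ih, pvLitB, hmem]
    · rw [if_neg hmem]
      by_cases hl : 0 < l
      · simp [hl, ih, pvLitB, hmem]
      · simp [hl, pvLitB, hmem]

theorem pvSatisfyAll_eq (Clauses : List (List Int)) (Variables : List Int) (a : List Bool)
    (hpre : ∀ v ∈ Variables, pvInR v a.length) :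
    pvSatisfyAll Variables a Clauses = some (pvClausesOK Clauses Variables a) := by
  induction Clauses with
  | nil => rfl
  | cons c cs ih =>
    rw [pvSatisfyAll, pvSatisfyClause_eq Variables a hpre c]
    by_cases hc : c.any (pvLitB Variables a)
    · simp [hc, ih, pvClausesOK]
    · simp only [hc]
      simp [pvClausesOK, hc]

theorem pvFind?_congr {α : Type} (l : List α) (p q : α → Bool) (h : ∀ x ∈ l, p x = q x) :
    l.find? p = l.find? q := by
  induction l with
  | nil => rfl
  | cons x xs ih =>
    rw [List.find?_cons, List.find?_cons, h x (by simp)]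
    cases q x
    · exact ih (fun y hy => h y (by simp [hy]))
    · rfl

theorem pvAssignValue_eq' (v : Int) (b : Bool) (a : List Bool) (n : Nat)
    (ha : a.length = n) (h : pvInR v n) :
    pvAssignValue v b a = some (a.set (pvIdx v n) (pvVal v b)) := by
  subst ha; exact pvAssignValue_eq v b a h

-- characterisation of A's backtrack: scan the combos in True-first order, thread the writes
theorem pvBacktrack_char (Clauses : List (List Int)) (Variables : List Int) (n : Nat)
    (hpre : ∀ v ∈ Variables, pvInR v n) (rest : List Int) :
    ∀ (a : List Bool), a.length = n → (∀ v ∈ rest, v ∈ Variables) →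
      pvBacktrack Clauses Variables a rest =
        (match (pvCombos rest.length).find?
            (fun c => pvClausesOK Clauses Variables (pvGo a (pvW n rest c))) with
         | some c => some (true, pvGo a (pvW n rest c))
         | none => some (false, pvGo a (pvW n rest (List.replicate rest.length false)))) := by
  induction rest with
  | nil =>
    intro a ha _
    have hpa : ∀ v ∈ Variables, pvInR v a.length := by rw [ha]; exact hpre
    rw [pvBacktrack, pvSatisfyAll_eq Clauses Variables a hpa]
    by_cases h : pvClausesOK Clauses Variables a
    · simp [pvCombos, List.find?, h, pvW, pvGo]
    · simp [pvCombos, List.find?, h, pvW, pvGo]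
  | cons v vs ih =>
    intro a ha hsub
    have hvIn : pvInR v n := hpre v (hsub v (by simp))
    have hsub' : ∀ u ∈ vs, u ∈ Variables := fun u hu => hsub u (by simp [hu])
    have hstep : pvBacktrack Clauses Variables a (v :: vs) =
        (match pvBacktrack Clauses Variables (a.set (pvIdx v n) (pvVal v true)) vs with
         | none => none
         | some (true, a1') => some (true, a1')
         | some (false, a1') =>
           match pvAssignValue v false a1' with
           | none => none
           | some a2 => pvBacktrack Clauses Variables a2 vs) := by
      rw [pvBacktrack, pvAssignValue_eq' v true a n ha hvIn]
    have ha1 : (a.set (pvIdx v n) (pvVal v true)).length = n := by simp [ha]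
    -- the find? over combos of length vs.length + 1 splits into the True half and the False half
    have hsplit :
        (pvCombos (vs.length + 1)).find?
            (fun c => pvClausesOK Clauses Variables (pvGo a (pvW n (v :: vs) c))) =
          (((pvCombos vs.length).find?
              (fun c => pvClausesOK Clauses Variables
                (pvGo (a.set (pvIdx v n) (pvVal v true)) (pvW n vs c)))).map (true :: ·)).or
          (((pvCombos vs.length).find?
              (fun c => pvClausesOK Clauses Variables
                (pvGo (a.set (pvIdx v n) (pvVal v false)) (pvW n vs c)))).map (false :: ·)) := by
      rw [pvCombos, List.find?_append, List.find?_map, List.find?_map]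
      rfl
    cases hfT : (pvCombos vs.length).find?
        (fun c => pvClausesOK Clauses Variables
          (pvGo (a.set (pvIdx v n) (pvVal v true)) (pvW n vs c))) with
    | some c =>
      rw [hstep, ih _ ha1 hsub', hfT, List.length_cons, hsplit, hfT]
      rfl
    | none =>
      have hL1 : pvBacktrack Clauses Variables (a.set (pvIdx v n) (pvVal v true)) vs =
          some (false, pvGo (a.set (pvIdx v n) (pvVal v true))
            (pvW n vs (List.replicate vs.length false))) := by
        rw [ih _ ha1 hsub', hfT]
      have ha1' : (pvGo (a.set (pvIdx v n) (pvVal v true))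
          (pvW n vs (List.replicate vs.length false))).length = n := by
        rw [length_pvGo]; simpa using ha
      have hL3 : pvBacktrack Clauses Variables a (v :: vs) =
          pvBacktrack Clauses Variables
            ((pvGo (a.set (pvIdx v n) (pvVal v true))
              (pvW n vs (List.replicate vs.length false))).set (pvIdx v n) (pvVal v false)) vs := by
        rw [hstep, hL1]
        show (match pvAssignValue v false (pvGo (a.set (pvIdx v n) (pvVal v true))
                (pvW n vs (List.replicate vs.length false))) with
              | none => none
              | some a2 => pvBacktrack Clauses Variables a2 vs) = _
        rw [pvAssignValue_eq' v false _ n ha1' hvIn]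
      have ha2 : ((pvGo (a.set (pvIdx v n) (pvVal v true))
          (pvW n vs (List.replicate vs.length false))).set (pvIdx v n) (pvVal v false)).length = n := by
        simpa using ha1'
      rw [hL3, ih _ ha2 hsub']
      have hov : ∀ c : List Bool, c.length = vs.length →
          pvGo ((pvGo (a.set (pvIdx v n) (pvVal v true))
              (pvW n vs (List.replicate vs.length false))).set (pvIdx v n) (pvVal v false))
            (pvW n vs c) =
          pvGo (a.set (pvIdx v n) (pvVal v false)) (pvW n vs c) := by
        intro c hc
        exact pvGo_overwrite (pvW n vs (List.replicate vs.length false)) (pvW n vs c)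
          (by rw [pvW_fst n vs _ (by simp), pvW_fst n vs c hc]) a (pvIdx v n)
          (pvVal v true) (pvVal v false)
      have hfind : (pvCombos vs.length).find?
          (fun c => pvClausesOK Clauses Variables
            (pvGo ((pvGo (a.set (pvIdx v n) (pvVal v true))
                (pvW n vs (List.replicate vs.length false))).set (pvIdx v n) (pvVal v false))
              (pvW n vs c))) =
        (pvCombos vs.length).find?
          (fun c => pvClausesOK Clauses Variables
            (pvGo (a.set (pvIdx v n) (pvVal v false)) (pvW n vs c))) :=
        pvFind?_congr _ _ _
          (fun c hcmem => by rw [hov c (length_pvCombos_mem _ c hcmem)])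
      rw [hfind, List.length_cons, hsplit, hfT]
      cases hfF : (pvCombos vs.length).find?
          (fun c => pvClausesOK Clauses Variables
            (pvGo (a.set (pvIdx v n) (pvVal v false)) (pvW n vs c))) with
      | some c =>
        have hc : c.length = vs.length :=
          length_pvCombos_mem _ c (List.mem_of_find?_eq_some hfF)
        simp only [Option.map_none, Option.none_or, Option.map_some]
        rw [hov c hc]
        rfl
      | none =>
        simp only [Option.map_none, Option.none_or]
        rw [hov (List.replicate vs.length false) (by simp)]
        rw [List.replicate_succ]
        rfl

-- B's per-mask assignment build is the same write sequence
theorem pvAssignB_char (n mask : Nat) (vs : List Int) :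
    ∀ (i : Nat) (a : List Bool), a.length = n → (∀ v ∈ vs, pvInR v n) →
      pvAssignB n mask vs i a =
        some (pvGo a (pvW n vs
          ((List.range' i vs.length).map (fun j => !(Nat.testBit mask (n - 1 - j)))))) := by
  induction vs with
  | nil => intro i a _ _; rfl
  | cons v vs ih =>
    intro i a ha hvs
    have hsv := pvAssignValue_eq' v (!(Nat.testBit mask (n - 1 - i))) a n ha (hvs v (by simp))
    rw [pvAssignValue] at hsv
    simp only [pvAssignB, hsv]
    rw [ih (i + 1) _ (by simp [ha]) (fun u hu => hvs u (by simp [hu]))]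
    simp only [List.length_cons, List.range'_succ, List.map_cons]
    rfl

-- B's mask loop scans the masks and returns on the first success
theorem pvMaskLoop_char (Clauses : List (List Int)) (Variables : List Int) (n : Nat)
    (hn : n = Variables.length) (hpre : ∀ v ∈ Variables, pvInR v n) :
    ∀ ms : List Nat,
      pvMaskLoop Clauses Variables n ms =
        match ms.find? (fun m => pvClausesOK Clauses Variables
            (pvGo (List.replicate n false) (pvW n Variables (pvComboOf n m)))) with
        | some m => pvOut n (pvGo (List.replicate n false) (pvW n Variables (pvComboOf n m)))
        | none => [] := by
  intro ms
  induction ms with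
  | nil => rfl
  | cons m ms ih =>
    have hbuild : pvAssignB n m Variables 0 (List.replicate n false) =
        some (pvGo (List.replicate n false) (pvW n Variables (pvComboOf n m))) := by
      rw [pvAssignB_char n m Variables 0 (List.replicate n false) (by simp) (fun v hv => hpre v hv)]
      rw [pvComboOf, List.range_eq_range', hn]
    simp only [pvMaskLoop, hbuild]
    cases h : pvClausesOK Clauses Variables (pvGo (List.replicate n false) (pvW n Variables (pvComboOf n m))) with
    | true =>
      rw [List.find?_cons_of_pos (by simpa using h)]
      rfl
    | false =>
      rw [List.find?_cons_of_neg (by simpa using h)]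
      exact ih

-- masks below 2^n read off the True-headed combos
theorem pvComboOf_low (n m : Nat) (hm : m < 2 ^ n) :
    pvComboOf (n + 1) m = true :: pvComboOf n m := by
  unfold pvComboOf
  rw [List.range_succ_eq_map, List.map_cons, List.map_map]
  have h0 : m.testBit (n + 1 - 1 - 0) = false := by
    simpa using Nat.testBit_lt_two_pow hm
  rw [h0]
  simp only [Bool.not_false, List.cons.injEq, true_and]
  apply List.map_congr_left
  intro j _
  have h1 : n - (j + 1) = n - 1 - j := by omega
  simp [Function.comp, h1]

-- masks 2^n + m read off the False-headed combos
theorem pvComboOf_high (n m : Nat) (hm : m < 2 ^ n) :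
    pvComboOf (n + 1) (2 ^ n + m) = false :: pvComboOf n m := by
  unfold pvComboOf
  rw [List.range_succ_eq_map, List.map_cons, List.map_map]
  have h0 : (2 ^ n + m).testBit (n + 1 - 1 - 0) = true := by
    have : (2 ^ n + m).testBit n = !m.testBit n := Nat.testBit_two_pow_add_eq m n
    simp [this, Nat.testBit_lt_two_pow hm]
  rw [h0]
  simp only [Bool.not_true, List.cons.injEq, true_and]
  apply List.map_congr_left
  intro j hj
  have hj' : j < n := List.mem_range.mp hj
  have hlt : n - 1 - j < n := by omega
  have hidx : n - (j + 1) = n - 1 - j := by omega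
  simp [Function.comp, hidx, Nat.testBit_two_pow_add_gt hlt m]

-- B's mask enumeration is exactly A's True-first combo enumeration
theorem pvCombos_eq (n : Nat) : (List.range (2 ^ n)).map (pvComboOf n) = pvCombos n := by
  induction n with
  | zero => rfl
  | succ n ih =>
    have h2 : 2 ^ (n + 1) = 2 ^ n + 2 ^ n := by rw [pow_succ]; omega
    rw [h2, List.range_add, List.map_append, List.map_map, pvCombos]
    congr 1
    · rw [← ih, List.map_map]
      apply List.map_congr_left
      intro m hm
      exact pvComboOf_low n m (List.mem_range.mp hm)
    · rw [← ih, List.map_map]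
      apply List.map_congr_left
      intro m hm
      exact pvComboOf_high n m (List.mem_range.mp hm)

theorem solve_spec : Claim_equal_solve := by
  intro Clauses Variables _ hpre
  unfold Spec_solve
  have hpre' : ∀ v ∈ Variables, pvInR v Variables.length := by
    intro v hv
    refine ⟨(hpre v hv).1, (hpre v hv).2, fun hv0 => ?_⟩
    subst hv0
    exact List.length_pos_of_mem hv
  have hbt := pvBacktrack_char Clauses Variables Variables.length hpre' Variables
    (List.replicate Variables.length false) (by simp) (fun _ h => h)
  have hml := pvMaskLoop_char Clauses Variables Variables.length rfl hpre'
    (List.range (2 ^ Variables.length))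
  have hcomp : (List.range (2 ^ Variables.length)).find?
      (fun m => pvClausesOK Clauses Variables (pvGo (List.replicate Variables.length false)
        (pvW Variables.length Variables (pvComboOf Variables.length m)))) =
    (List.range (2 ^ Variables.length)).find?
      ((fun c => pvClausesOK Clauses Variables (pvGo (List.replicate Variables.length false)
        (pvW Variables.length Variables c))) ∘ (pvComboOf Variables.length)) := rfl
  have hfind : (pvCombos Variables.length).find?
      (fun c => pvClausesOK Clauses Variables (pvGo (List.replicate Variables.length false)
        (pvW Variables.length Variables c))) =
    Option.map (pvComboOf Variables.length) ((List.range (2 ^ Variables.length)).find?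
      (fun m => pvClausesOK Clauses Variables (pvGo (List.replicate Variables.length false)
        (pvW Variables.length Variables (pvComboOf Variables.length m))))) := by
    rw [hcomp, ← List.find?_map, pvCombos_eq]
  simp only [solve, solve_alt]
  rw [hbt, hml, hfind]
  cases hf : (List.range (2 ^ Variables.length)).find?
      (fun m => pvClausesOK Clauses Variables (pvGo (List.replicate Variables.length false)
        (pvW Variables.length Variables (pvComboOf Variables.length m)))) with
  | some m => rfl
  | none => rfl
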